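-- pv_equiv track=rewrite | github.com/lqor/pdprep | scripts/analyze-questions.py | find_duplicate_patterns
-- ===== SOURCE A (Python) =====
-- from collections import defaultdict
-- from typing import Dict, List, Tuple
--
-- def find_duplicate_patterns(questions: List[Dict]) -> Dict[str, List[int]]:
--     """Find questions with identical or very similar content."""
--     duplicates = defaultdict(list)
--
--     # Group by explanation text
--     explanation_map = defaultdict(list)
--     for idx, q in enumerate(questions):
--         explanation_map[q['explanation']].append(idx)
--
--     # Find duplicates (explanation used 3+ times suggests templated questions)
--     for explanation, indices in explanation_map.items():
--         if len(indices) >= 3: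
--             duplicates[explanation] = indices
--
--     return duplicates
-- ===== SOURCE B (Python) =====
-- def find_duplicate_patterns(questions):
--     """Find questions with identical or very similar content."""
--     # No hash map at all: for each first occurrence of an explanation,
--     # scan the whole list for its indices and keep the group if it has 3+.
--     result = {}
--     for i, q in enumerate(questions):
--         e = q['explanation']
--         if any(p['explanation'] == e for p in questions[:i]):
--             continue  # already handled at its first occurrence
--         idxs = [j for j, p in enumerate(questions) if p['explanation'] == e]
--         if len(idxs) >= 3:
--             result[e] = idxs
--     return result
-- ===== Notes on version B (the rewrite author's own statement) =====
-- stated objective: alternative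
-- what changed: A builds a hash map grouping every index by explanation and then filters the finished map by group size; B uses no grouping map at all: for each index whose explanation has no earlier occurrence it scans the whole list to collect that explanation's indices and keeps the group only if it has 3 or more, trading A's O(n) hashing for dictionary-free quadratic scans.
import Mathlib
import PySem

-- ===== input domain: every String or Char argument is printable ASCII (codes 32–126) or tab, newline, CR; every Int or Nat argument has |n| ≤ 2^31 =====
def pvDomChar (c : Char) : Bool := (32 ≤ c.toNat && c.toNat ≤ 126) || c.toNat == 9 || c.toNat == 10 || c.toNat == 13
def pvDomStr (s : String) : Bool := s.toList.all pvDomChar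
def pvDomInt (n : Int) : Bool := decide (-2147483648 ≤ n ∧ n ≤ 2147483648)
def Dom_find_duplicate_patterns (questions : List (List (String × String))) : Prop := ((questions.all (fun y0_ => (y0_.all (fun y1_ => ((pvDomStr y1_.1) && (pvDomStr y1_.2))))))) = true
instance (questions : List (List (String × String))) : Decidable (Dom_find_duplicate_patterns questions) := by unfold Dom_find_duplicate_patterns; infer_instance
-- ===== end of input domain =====

-- B drops A's hash-grouping entirely: at each first occurrence of an explanation it scans the
-- whole list for that explanation's indices and keeps the group only when it has 3 or more.

-- q['explanation']; the `.getD ""` arm is unreachable under Pre_ (the key is present).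
def pvExpl (q : List (String × String)) : String :=
  ((PySem.Dict.mk q).get? "explanation").getD ""

-- ===== PORT A =====
def find_duplicate_patterns (questions : List (List (String × String))) : List (String × List Int) :=
  let explanation_map : PySem.Dict String (List Int) :=
    (PySem.List.enumerate questions).foldl
      (fun d p => d.modify (pvExpl p.2) [] (fun l => l ++ [p.1])) PySem.Dict.empty
  let duplicates : PySem.Dict String (List Int) :=
    explanation_map.items.foldl
      (fun d p => if 3 ≤ p.2.length then d.insert p.1 p.2 else d) PySem.Dict.empty
  duplicates.items

-- ===== PORT B =====
def find_duplicate_patterns_alt (questions : List (List (String × String))) : List (String × List Int) :=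
  let result : PySem.Dict String (List Int) :=
    (PySem.List.enumerate questions).foldl
      (fun d p =>
        let e := pvExpl p.2
        if (PySem.List.slice questions none (some p.1)).any (fun q => pvExpl q == e) then d
        else
          let idxs : List Int :=
            ((PySem.List.enumerate questions).filter (fun r => pvExpl r.2 == e)).map Prod.fst
          if 3 ≤ idxs.length then d.insert e idxs else d)
      PySem.Dict.empty
  result.items

-- ===== PRECONDITION & SPEC =====
-- Pre_: every question dict has the key 'explanation' (otherwise A raises KeyError).
def Pre_find_duplicate_patterns (questions : List (List (String × String))) : Prop :=
  (questions.all (fun q => (PySem.Dict.mk q).contains "explanation")) = true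
instance (questions : List (List (String × String))) : Decidable (Pre_find_duplicate_patterns questions) := by unfold Pre_find_duplicate_patterns; infer_instance

def pvWitness_find_duplicate_patterns : (List (List (String × String))) :=
  [[("explanation", "x")], [("explanation", "x")], [("explanation", "y")], [("explanation", "x")]]

def Spec_find_duplicate_patterns (questions : List (List (String × String))) (out : List (String × List Int)) : Prop := out = find_duplicate_patterns_alt questions
instance (questions : List (List (String × String))) (out : List (String × List Int)) : Decidable (Spec_find_duplicate_patterns questions out) := by unfold Spec_find_duplicate_patterns; infer_instance

-- ===== CLAIM (what is proved, stated in full; the proofs are below) =====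
def Claim_equal_find_duplicate_patterns : Prop := ∀ (questions : List (List (String × String))), Dom_find_duplicate_patterns questions → Pre_find_duplicate_patterns questions → Spec_find_duplicate_patterns questions (find_duplicate_patterns questions)

-- ===== LEMMAS AND PROOFS =====

-- a foldl that skips the elements failing P is the foldl over the filtered list
theorem pvFoldlIteFilter {σ α : Type} (P : α → Prop) [DecidablePred P] (g : σ → α → σ)
    (l : List α) (s : σ) :
    l.foldl (fun s x => if P x then g s x else s) s
      = (l.filter (fun x => decide (P x))).foldl g s := by
  induction l generalizing s with
  | nil => rfl
  | cons a t ih => by_cases h : P a <;> simp [List.filter, h, ih]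

-- the items of A's grouping fold, in closed form
theorem pvGroupItems (l : List (String × Int)) :
    ((l.foldl (fun d p => d.modify p.1 [] (fun v => v ++ [p.2])) PySem.Dict.empty).items)
      = (PySem.Set.ofList (l.map Prod.fst)).map
          (fun k => (k, ((l.filter (fun p => p.1 == k)).map Prod.snd))) := by
  induction l using List.reverseRecOn with
  | nil => rfl
  | append_singleton t p ih =>
    have hmodins : ∀ (d : PySem.Dict String (List Int)),
        d.modify p.1 [] (fun v => v ++ [p.2]) = d.insert p.1 (d.getD p.1 [] ++ [p.2]) :=
      fun d => rfl
    have hkeys : (t.foldl (fun d q => d.modify q.1 [] (fun v => v ++ [q.2]))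
        PySem.Dict.empty).keys = PySem.Set.ofList (t.map Prod.fst) := by
      simpa [PySem.Set.ofList_eq_foldl, PySem.Set.update] using
        PySem.Dict.keys_foldl_modify_key t Prod.fst [] (fun _ q v => v ++ [q.2])
          PySem.Dict.empty
    have hget : (t.foldl (fun d q => d.modify q.1 [] (fun v => v ++ [q.2]))
        PySem.Dict.empty).getD p.1 [] = (t.filter (fun q => q.1 == p.1)).map Prod.snd := by
      simpa using PySem.Dict.getD_foldl_modify_append t PySem.Dict.empty p.1
    rw [List.foldl_append]
    simp only [List.foldl_cons, List.foldl_nil, List.map_append, List.map_cons, List.map_nil]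
    rw [hmodins]
    by_cases hc : p.1 ∈ (PySem.Set.ofList (t.map Prod.fst) : List String)
    · have hcon : (t.foldl (fun d q => d.modify q.1 [] (fun v => v ++ [q.2]))
          PySem.Dict.empty).contains p.1 = true := by
        rw [PySem.Dict.contains_iff_mem_keys, hkeys]; exact hc
      rw [PySem.Dict.items_insert_of_contains _ _ hcon, ih, hget, List.map_map]
      have hofl : PySem.Set.ofList (t.map Prod.fst ++ [p.1])
          = PySem.Set.ofList (t.map Prod.fst) := by
        rw [PySem.Set.ofList_append_singleton, PySem.Set.add_of_mem hc]
      rw [hofl]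
      refine List.map_congr_left ?_
      intro k hk
      by_cases hkp : k = p.1
      · subst hkp; simp [Function.comp, List.filter_append, List.filter]
      · have hb : (k == p.1) = false := by simp [hkp]
        have hb' : (p.1 == k) = false := by simp [Ne.symm hkp]
        simp [Function.comp, hb, hb', List.filter_append, List.filter]
    · have hcon : (t.foldl (fun d q => d.modify q.1 [] (fun v => v ++ [q.2]))
          PySem.Dict.empty).contains p.1 = false := by
        rw [← Bool.not_eq_true, PySem.Dict.contains_iff_mem_keys, hkeys]; exact hc
      rw [PySem.Dict.items_insert_of_not_contains _ _ hcon, ih, hget]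
      have hfil : t.filter (fun q => q.1 == p.1) = [] := by
        refine List.filter_eq_nil_iff.mpr ?_
        intro q hq h
        exact hc ((PySem.Set.mem_ofList _ _).mpr
          ((by simpa using h : q.1 = p.1) ▸ List.mem_map_of_mem hq))
      have hofl : PySem.Set.ofList (t.map Prod.fst ++ [p.1])
          = PySem.Set.ofList (t.map Prod.fst) ++ [p.1] := by
        rw [PySem.Set.ofList_append_singleton, PySem.Set.add_of_not_mem hc]
      rw [hofl, List.map_append, hfil]
      congr 1
      · refine List.map_congr_left ?_
        intro k hk
        have hkp : k ≠ p.1 := fun h => hc (h ▸ hk)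
        have hb' : (p.1 == k) = false := by simp [Ne.symm hkp]
        simp [List.filter_append, List.filter, hb']
      · simp [List.filter_append, List.filter]
        intro a b hab ha
        exact hc ((PySem.Set.mem_ofList _ _).mpr (ha ▸ List.mem_map_of_mem hab))

-- enumerate commutes with map
theorem pvEnumerateMap {α β : Type} (f : α → β) (xs : List α) (s : Int) :
    PySem.List.enumerate (xs.map f) s = (PySem.List.enumerate xs s).map (fun p => (p.1, f p.2)) := by
  induction xs generalizing s with
  | nil => rfl
  | cons a t ih => simp [PySem.List.enumerate_cons, ih]

-- B's first-occurrence fold over a key list, in closed form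
theorem pvBFold (ks : List String) (G : String → List Int) (R : String → Bool) :
    ((PySem.List.enumerate ks).foldl
      (fun (d : PySem.Dict String (List Int)) p =>
        if (ks.take p.1.toNat).any (fun x => x == p.2) then d
        else if R p.2 then d.insert p.2 (G p.2) else d)
      PySem.Dict.empty).items
    = ((PySem.Set.ofList ks).filter R).map (fun k => (k, G k)) := by
  induction ks using List.reverseRecOn with
  | nil => rfl
  | append_singleton t e ih =>
    rw [PySem.List.enumerate_append, List.foldl_append]
    have hcongr : (PySem.List.enumerate t 0).foldl
        (fun (d : PySem.Dict String (List Int)) p =>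
          if ((t ++ [e]).take p.1.toNat).any (fun x => x == p.2) then d
          else if R p.2 then d.insert p.2 (G p.2) else d) PySem.Dict.empty
      = (PySem.List.enumerate t 0).foldl
        (fun (d : PySem.Dict String (List Int)) p =>
          if (t.take p.1.toNat).any (fun x => x == p.2) then d
          else if R p.2 then d.insert p.2 (G p.2) else d) PySem.Dict.empty := by
      refine PySem.List.foldl_congr_mem _ _ _ _ ?_
      intro acc p hp
      obtain ⟨k, hk, rfl⟩ := (PySem.List.mem_enumerate_iff _ _ _).mp hp
      have htake : (t ++ [e]).take ((0 + (k : Int)).toNat) = t.take ((0 + (k : Int)).toNat) := by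
        rw [List.take_append_of_le_length]
        simp; omega
      rw [htake]
    rw [hcongr]
    set d := (PySem.List.enumerate t 0).foldl
      (fun (d : PySem.Dict String (List Int)) p =>
        if (t.take p.1.toNat).any (fun x => x == p.2) then d
        else if R p.2 then d.insert p.2 (G p.2) else d) PySem.Dict.empty with hd
    have hlast : PySem.List.enumerate [e] (0 + (t.length : Int)) = [((t.length : Int), e)] := by
      simp [PySem.List.enumerate_cons, PySem.List.enumerate_nil]
    rw [hlast]
    simp only [List.foldl_cons, List.foldl_nil, Int.toNat_natCast]
    have htake : (t ++ [e]).take t.length = t := List.take_left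
    rw [htake]
    by_cases he : e ∈ t
    · have hany : t.any (fun x => x == e) = true := by
        simp only [List.any_eq_true]; exact ⟨e, he, by simp⟩
      rw [if_pos hany]
      have hofl : PySem.Set.ofList (t ++ [e]) = PySem.Set.ofList t := by
        rw [PySem.Set.ofList_append_singleton,
          PySem.Set.add_of_mem ((PySem.Set.mem_ofList _ _).mpr he)]
      rw [hofl, ih]
    · have hany : t.any (fun x => x == e) = false := by
        simp only [List.any_eq_false, beq_iff_eq]
        intro x hx hxe
        exact he (hxe ▸ hx)
      rw [if_neg (by simp [hany])]
      have hofl : PySem.Set.ofList (t ++ [e]) = PySem.Set.ofList t ++ [e] := by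
        rw [PySem.Set.ofList_append_singleton,
          PySem.Set.add_of_not_mem (fun h => he ((PySem.Set.mem_ofList _ _).mp h))]
      rw [hofl, List.filter_append]
      by_cases hr : R e = true
      · have hcon : d.contains e = false := by
          rw [← Bool.not_eq_true, PySem.Dict.contains_iff_mem_keys]
          have hkeq : d.keys = d.items.map Prod.fst := rfl
          rw [hkeq, ih, List.map_map]
          intro hmem
          have hmem' : e ∈ (PySem.Set.ofList t).filter R := by simpa using hmem
          exact he ((PySem.Set.mem_ofList _ _).mp (List.mem_of_mem_filter hmem'))
        rw [if_pos hr, PySem.Dict.items_insert_of_not_contains _ _ hcon, ih]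
        simp [List.filter, hr]
      · rw [if_neg hr, ih]
        simp [List.filter, Bool.of_not_eq_true hr]

-- ===== VERDICT (by name: the statement is the Claim_ definition above) =====
theorem find_duplicate_patterns_spec : Claim_equal_find_duplicate_patterns := by
  intro questions _ _
  unfold Spec_find_duplicate_patterns find_duplicate_patterns find_duplicate_patterns_alt
  dsimp only []
  set l : List (String × Int) :=
    (PySem.List.enumerate questions).map (fun p => (pvExpl p.2, p.1)) with hl
  set G : String → List Int := fun e =>
    ((PySem.List.enumerate questions).filter (fun r => pvExpl r.2 == e)).map Prod.fst with hG
  set R : String → Bool := fun e => decide (3 ≤ (G e).length) with hR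
  set ks : List String := questions.map pvExpl with hks
  -- the key multisets coincide
  have hcnt : ks = l.map Prod.fst := by
    rw [hks]
    conv_lhs => rw [← PySem.List.map_snd_enumerate questions 0]
    rw [hl, List.map_map, List.map_map]
    rfl
  -- the grouped values coincide: filtering l at key k lists exactly G k
  have hFG : ∀ k, (l.filter (fun p => p.1 == k)).map Prod.snd = G k := by
    intro k
    rw [hl, hG, List.filter_map, List.map_map]
    rfl
  -- ===== A's side =====
  have hA : (PySem.List.enumerate questions).foldl
      (fun d p => d.modify (pvExpl p.2) [] (fun v => v ++ [p.1])) PySem.Dict.empty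
    = l.foldl (fun d q => d.modify q.1 [] (fun v => v ++ [q.2])) PySem.Dict.empty := by
    rw [hl, List.foldl_map]
  rw [hA, pvFoldlIteFilter, pvGroupItems, List.filter_map]
  have hitems : ∀ (m : List (String × List Int)), (m.map Prod.fst).Nodup →
      (m.foldl (fun d p => d.insert p.1 p.2) PySem.Dict.empty).items = m := by
    intro m hm
    simpa using PySem.Dict.items_foldl_insert_fresh m Prod.fst Prod.snd PySem.Dict.empty
      (fun a _ => PySem.Dict.contains_empty _) hm
  rw [hitems _ (by
    rw [List.map_map]
    have h2 : (Prod.fst ∘ fun k : String => (k, ((l.filter (fun p => p.1 == k)).map Prod.snd)))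
        = id := rfl
    rw [h2, List.map_id]
    exact List.Nodup.filter _ (PySem.Set.nodup_ofList (l.map Prod.fst)))]
  -- ===== B's side =====
  have hB : (PySem.List.enumerate questions).foldl
      (fun (d : PySem.Dict String (List Int)) p =>
        if (PySem.List.slice questions none (some p.1)).any
            (fun q => pvExpl q == pvExpl p.2) then d
        else if 3 ≤ (G (pvExpl p.2)).length then
          d.insert (pvExpl p.2) (G (pvExpl p.2)) else d)
      PySem.Dict.empty
    = (PySem.List.enumerate ks).foldl
      (fun (d : PySem.Dict String (List Int)) p =>
        if (ks.take p.1.toNat).any (fun x => x == p.2) then d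
        else if R p.2 then d.insert p.2 (G p.2) else d)
      PySem.Dict.empty := by
    rw [hks, pvEnumerateMap, List.foldl_map]
    refine PySem.List.foldl_congr_mem _ _ _ _ ?_
    intro acc p hp
    obtain ⟨k, hk, rfl⟩ := (PySem.List.mem_enumerate_iff _ _ _).mp hp
    simp only [zero_add, Int.toNat_natCast]
    have hsl : PySem.List.slice questions none (some (k : Int)) = questions.take k :=
      PySem.List.slice_to_natCast questions k
    rw [hsl, ← List.map_take, List.any_map]
    simp [hR, Function.comp]
  rw [hB, pvBFold]
  -- ===== both sides are the same list =====
  rw [hcnt]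
  have hRA : ∀ k ∈ (PySem.Set.ofList (l.map Prod.fst) : List String),
      ((fun p : String × List Int => decide (3 ≤ p.2.length)) ∘
        (fun k => (k, (l.filter (fun p => p.1 == k)).map Prod.snd))) k = R k := by
    intro k _
    simp only [Function.comp, hR, hFG k]
  rw [List.filter_congr hRA]
  refine List.map_congr_left ?_
  intro k _
  rw [hFG k]
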